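-- pv_equiv track=rewrite | github.com/aenealabs/aura | src/services/transform/cobol_parser.py | _identify_divisions
-- ===== SOURCE A (Python) =====
-- from enum import Enum
--
-- class COBOLDivision(str, Enum):
--     """COBOL program divisions."""
--
--     IDENTIFICATION = "identification"
--     ENVIRONMENT = "environment"
--     DATA = "data"
--     PROCEDURE = "procedure"
--
-- def _identify_divisions(
--     lines: list[str]
-- ) -> dict[COBOLDivision, tuple[int, int]]:
--     """Identify division boundaries in source."""
--     divisions = {}
--     current_division = None
--     division_start = 0
--
--     for i, line in enumerate(lines):
--         upper_line = line.upper().strip()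
--
--         if "IDENTIFICATION DIVISION" in upper_line:
--             if current_division:
--                 divisions[current_division] = (division_start, i)
--             current_division = COBOLDivision.IDENTIFICATION
--             division_start = i
--         elif "ENVIRONMENT DIVISION" in upper_line:
--             if current_division:
--                 divisions[current_division] = (division_start, i)
--             current_division = COBOLDivision.ENVIRONMENT
--             division_start = i
--         elif "DATA DIVISION" in upper_line:
--             if current_division:
--                 divisions[current_division] = (division_start, i)
--             current_division = COBOLDivision.DATA
--             division_start = i
--         elif "PROCEDURE DIVISION" in upper_line:
--             if current_division:
--                 divisions[current_division] = (division_start, i)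
--             current_division = COBOLDivision.PROCEDURE
--             division_start = i
--
--     if current_division:
--         divisions[current_division] = (division_start, len(lines))
--
--     return divisions
-- ===== SOURCE B (Python) =====
-- from enum import Enum
--
-- class COBOLDivision(str, Enum):
--     """COBOL program divisions."""
--
--     IDENTIFICATION = "identification"
--     ENVIRONMENT = "environment"
--     DATA = "data"
--     PROCEDURE = "procedure"
--
-- _KEYWORDS = [
--     ("IDENTIFICATION DIVISION", COBOLDivision.IDENTIFICATION),
--     ("ENVIRONMENT DIVISION", COBOLDivision.ENVIRONMENT),
--     ("DATA DIVISION", COBOLDivision.DATA),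
--     ("PROCEDURE DIVISION", COBOLDivision.PROCEDURE),
-- ]
--
-- def _classify(line):
--     upper_line = line.upper().strip()
--     return next((div for kw, div in _KEYWORDS if kw in upper_line), None)
--
-- def _identify_divisions(
--     lines: list[str]
-- ) -> dict[COBOLDivision, tuple[int, int]]:
--     """Identify division boundaries in source."""
--     markers = [(div, i) for i, line in enumerate(lines)
--                if (div := _classify(line)) is not None]
--     ends = [i for _, i in markers[1:]] + [len(lines)]
--     return {div: (start, end) for (div, start), end in zip(markers, ends)}
-- ===== Notes on version B (the rewrite author's own statement) =====
-- stated objective: simpler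
-- what changed: Replaces the running current_division/division_start state machine with a two-pass decomposition: collect (division, index) markers via a keyword table, then pair each marker with the next marker's index (or len(lines)) in a dict comprehension.
import Mathlib
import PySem

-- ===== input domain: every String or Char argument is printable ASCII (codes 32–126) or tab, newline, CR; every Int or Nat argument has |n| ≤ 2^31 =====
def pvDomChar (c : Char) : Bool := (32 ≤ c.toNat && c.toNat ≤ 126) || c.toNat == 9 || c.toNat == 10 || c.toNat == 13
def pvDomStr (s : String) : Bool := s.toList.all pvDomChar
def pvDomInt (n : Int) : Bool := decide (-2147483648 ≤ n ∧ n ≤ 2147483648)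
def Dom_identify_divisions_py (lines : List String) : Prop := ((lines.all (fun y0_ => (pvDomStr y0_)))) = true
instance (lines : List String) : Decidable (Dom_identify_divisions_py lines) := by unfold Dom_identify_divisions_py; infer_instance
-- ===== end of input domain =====

-- B replaces A's running current_division/division_start state machine by a two-pass
-- marker-pairing decomposition (collect (division, index) markers, then pair consecutive
-- boundaries); objective: simpler, same cost.


-- ===== PORT A =====
-- A's fold state: (divisions dict, current_division, division_start)
def pvStepA (st : PySem.Dict String (Int × Int) × Option String × Int) (p : Int × String) :
    PySem.Dict String (Int × Int) × Option String × Int :=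
  let (divisions, current, dstart) := st
  let (i, line) := p
  let upper_line := PySem.Str.strip (PySem.Str.upper line)
  if PySem.Str.isIn "IDENTIFICATION DIVISION" upper_line then
    ((match current with | some c => divisions.insert c (dstart, i) | none => divisions),
     some "identification", i)
  else if PySem.Str.isIn "ENVIRONMENT DIVISION" upper_line then
    ((match current with | some c => divisions.insert c (dstart, i) | none => divisions),
     some "environment", i)
  else if PySem.Str.isIn "DATA DIVISION" upper_line then
    ((match current with | some c => divisions.insert c (dstart, i) | none => divisions),
     some "data", i)
  else if PySem.Str.isIn "PROCEDURE DIVISION" upper_line then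
    ((match current with | some c => divisions.insert c (dstart, i) | none => divisions),
     some "procedure", i)
  else st

def identify_divisions_py (lines : List String) : List (String × Int × Int) :=
  let st := (PySem.List.enumerate lines).foldl pvStepA
              ((PySem.Dict.empty : PySem.Dict String (Int × Int)), none, 0)
  let (divisions, current, dstart) := st
  (match current with
   | some c => divisions.insert c (dstart, (lines.length : Int))
   | none => divisions).items

-- ===== PORT B =====
def pvKeywordsB : List (String × String) :=
  [("IDENTIFICATION DIVISION", "identification"),
   ("ENVIRONMENT DIVISION", "environment"),
   ("DATA DIVISION", "data"),
   ("PROCEDURE DIVISION", "procedure")]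

def pvClassifyB (line : String) : Option String :=
  let upper_line := PySem.Str.strip (PySem.Str.upper line)
  (pvKeywordsB.find? (fun p => PySem.Str.isIn p.1 upper_line)).map (·.2)

def identify_divisions_py_alt (lines : List String) : List (String × Int × Int) :=
  let markers := (PySem.List.enumerate lines).filterMap
                   (fun p => (pvClassifyB p.2).map (fun d => (d, p.1)))
  let ends := (markers.drop 1).map (·.2) ++ [(lines.length : Int)]
  ((markers.zip ends).foldl
      (fun d pe => d.insert pe.1.1 (pe.1.2, pe.2))
      (PySem.Dict.empty : PySem.Dict String (Int × Int))).items

-- ===== PRECONDITION & SPEC =====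
def Spec_identify_divisions_py (lines : List String) (out : List (String × Int × Int)) : Prop := out = identify_divisions_py_alt lines
instance (lines : List String) (out : List (String × Int × Int)) : Decidable (Spec_identify_divisions_py lines out) := by unfold Spec_identify_divisions_py; infer_instance

-- ===== CLAIM (what is proved, stated in full; the proofs are below) =====
def Claim_equal_identify_divisions_py : Prop := ∀ (lines : List String), Dom_identify_divisions_py lines → Spec_identify_divisions_py lines (identify_divisions_py lines)

-- ===== LEMMAS AND PROOFS =====

-- B's pairing fold, started from an arbitrary dict
def pvBuildB (d : PySem.Dict String (Int × Int)) (m : List (String × Int)) (n : Int) :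
    PySem.Dict String (Int × Int) :=
  (m.zip ((m.drop 1).map (·.2) ++ [n])).foldl (fun d pe => d.insert pe.1.1 (pe.1.2, pe.2)) d

-- A's pending current division, seen as a leading marker
def pvPending (current : Option String) (dstart : Int) : List (String × Int) :=
  match current with | some c => [(c, dstart)] | none => []

-- A's finishing step after the loop
def pvFinishA (st : PySem.Dict String (Int × Int) × Option String × Int) (n : Int) :
    PySem.Dict String (Int × Int) :=
  match st.2.1 with | some c => st.1.insert c (st.2.2, n) | none => st.1

theorem pvStepA_eq (st : PySem.Dict String (Int × Int) × Option String × Int) (i : Int) (line : String) :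
    pvStepA st (i, line) =
      match pvClassifyB line with
      | none => st
      | some v => ((match st.2.1 with
                    | some c => st.1.insert c (st.2.2, i)
                    | none => st.1), some v, i) := by
  obtain ⟨d, cur, s⟩ := st
  simp only [pvStepA, pvClassifyB, pvKeywordsB]
  split_ifs with h1 h2 h3 h4
  · rw [List.find?_cons_of_pos (by simpa using h1)]; rfl
  · rw [List.find?_cons_of_neg (by simpa using h1),
        List.find?_cons_of_pos (by simpa using h2)]; rfl
  · rw [List.find?_cons_of_neg (by simpa using h1),
        List.find?_cons_of_neg (by simpa using h2),
        List.find?_cons_of_pos (by simpa using h3)]; rfl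
  · rw [List.find?_cons_of_neg (by simpa using h1),
        List.find?_cons_of_neg (by simpa using h2),
        List.find?_cons_of_neg (by simpa using h3),
        List.find?_cons_of_pos (by simpa using h4)]; rfl
  · rw [List.find?_cons_of_neg (by simpa using h1),
        List.find?_cons_of_neg (by simpa using h2),
        List.find?_cons_of_neg (by simpa using h3),
        List.find?_cons_of_neg (by simpa using h4)]; rfl

theorem pvBuildB_shift (d : PySem.Dict String (Int × Int)) (c : String) (s : Int)
    (v : String) (i : Int) (m : List (String × Int)) (n : Int) :
    pvBuildB d ((c, s) :: (v, i) :: m) n = pvBuildB (d.insert c (s, i)) ((v, i) :: m) n := by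
  simp [pvBuildB]

theorem pvInvariant (ls : List String) (s : Int) (d : PySem.Dict String (Int × Int))
    (cur : Option String) (st n : Int) :
    pvFinishA ((PySem.List.enumerate ls s).foldl pvStepA (d, cur, st)) n
      = pvBuildB d (pvPending cur st ++
          (PySem.List.enumerate ls s).filterMap
            (fun p => (pvClassifyB p.2).map (fun v => (v, p.1)))) n := by
  induction ls generalizing s d cur st with
  | nil =>
      cases cur <;> simp [PySem.List.enumerate_nil, pvFinishA, pvPending, pvBuildB]
  | cons l rest ih =>
      rw [PySem.List.enumerate_cons]
      simp only [List.foldl_cons, List.filterMap_cons]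
      rw [pvStepA_eq]
      cases hc : pvClassifyB l with
      | none => simp [ih]
      | some v =>
          simp only [Option.map_some]
          rw [ih]
          cases cur with
          | none => simp [pvPending]
          | some c => simp [pvPending, pvBuildB_shift]

-- ===== VERDICT (by name: the statement is the Claim_ definition above) =====
theorem identify_divisions_py_spec : Claim_equal_identify_divisions_py := by
  intro lines _
  show identify_divisions_py lines = identify_divisions_py_alt lines
  unfold identify_divisions_py identify_divisions_py_alt
  have h := pvInvariant lines 0 PySem.Dict.empty none 0 (lines.length : Int)
  simp only [pvPending, List.nil_append] at h
  rcases hfold : (PySem.List.enumerate lines).foldl pvStepA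
      ((PySem.Dict.empty : PySem.Dict String (Int × Int)), none, 0) with ⟨d, cur, st⟩
  rw [hfold] at h
  cases cur <;>
    simpa [identify_divisions_py, identify_divisions_py_alt, hfold, pvFinishA, pvBuildB]
      using congrArg PySem.Dict.items h
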